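-- pv_equiv track=rewrite | github.com/Eduardoccufcg/Programming-1 | ultimoind/ultimo.py | ultimo_indice
-- ===== SOURCE A (Python) =====
-- def ultimo_indice(num,lista):
-- 	ta_na_lista = False
-- 	for i in range(len(lista)-1,-1,-1):
-- 		if lista[i] == num:
-- 			indice = i
-- 			ta_na_lista = True
-- 			break
-- 	if ta_na_lista == False:
-- 		d = -1
-- 	else:
-- 		d = indice
-- 	return d
-- ===== SOURCE B (Python) =====
-- def ultimo_indice(num, lista):
--     d = -1
--     for i, x in enumerate(lista):
--         if x == num:
--             d = i
--     return d
-- ===== Notes on version B (the rewrite author's own statement) =====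
-- stated objective: idiomatic
-- what changed: B scans the list forward with enumerate, overwriting the result on each match, instead of A's backward index loop with a break and a found-flag.
import Mathlib
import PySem

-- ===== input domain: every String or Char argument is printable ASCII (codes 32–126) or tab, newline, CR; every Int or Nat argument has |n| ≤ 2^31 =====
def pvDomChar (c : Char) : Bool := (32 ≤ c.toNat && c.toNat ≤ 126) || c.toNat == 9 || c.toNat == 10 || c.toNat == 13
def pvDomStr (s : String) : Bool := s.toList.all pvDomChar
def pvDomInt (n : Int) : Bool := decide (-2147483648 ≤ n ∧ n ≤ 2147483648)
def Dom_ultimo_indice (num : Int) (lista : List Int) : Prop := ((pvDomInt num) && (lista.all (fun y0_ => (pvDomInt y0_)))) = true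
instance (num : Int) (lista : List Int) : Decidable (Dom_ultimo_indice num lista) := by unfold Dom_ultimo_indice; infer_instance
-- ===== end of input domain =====

-- B replaces A's backward index loop with break and found-flag by a forward
-- enumerate scan that overwrites the result on each match (idiomatic; same cost).

-- ===== PORT A =====
-- A's for-loop over range(len(lista)-1,-1,-1) with break: first index (from the
-- right) whose element equals num, as an Option (none = flag stays False).
def ultimoALoop (num : Int) (lista : List Int) : List Int → Option Int
  | [] => none
  | i :: rest =>
    if PySem.List.pyGet? lista i = some num then some i
    else ultimoALoop num lista rest

def ultimo_indice (num : Int) (lista : List Int) : Int :=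
  match ultimoALoop num lista (PySem.List.pyRange ((lista.length : Int) - 1) (-1) (-1)) with
  | none => -1
  | some indice => indice

-- ===== PORT B =====
def ultimo_indice_alt (num : Int) (lista : List Int) : Int :=
  (PySem.List.enumerate lista).foldl (fun d p => if p.2 = num then p.1 else d) (-1)

-- ===== PRECONDITION & SPEC =====
def Spec_ultimo_indice (num : Int) (lista : List Int) (out : Int) : Prop := out = ultimo_indice_alt num lista
instance (num : Int) (lista : List Int) (out : Int) : Decidable (Spec_ultimo_indice num lista out) := by unfold Spec_ultimo_indice; infer_instance

-- ===== CLAIM (what is proved, stated in full; the proofs are below) =====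
def Claim_equal_ultimo_indice : Prop := ∀ (num : Int) (lista : List Int), Dom_ultimo_indice num lista → Spec_ultimo_indice num lista (ultimo_indice num lista)

-- ===== LEMMAS AND PROOFS =====

-- A's loop sees only indices inside xs, so appending an element does not change it.
theorem ultimoALoop_append (num x : Int) (xs : List Int) (r : List Int)
    (h : ∀ i ∈ r, 0 ≤ i ∧ i < (xs.length : Int)) :
    ultimoALoop num (xs ++ [x]) r = ultimoALoop num xs r := by
  induction r with
  | nil => rfl
  | cons i rest ih =>
    obtain ⟨h0, hlt⟩ := h i (by simp)
    have hget : PySem.List.pyGet? (xs ++ [x]) i = PySem.List.pyGet? xs i := by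
      obtain ⟨n, rfl⟩ : ∃ n : Nat, i = (n : Int) := ⟨i.toNat, by omega⟩
      rw [PySem.List.pyGet?_natCast, PySem.List.pyGet?_natCast,
        List.getElem?_append_left (by exact_mod_cast hlt)]
    simp only [ultimoALoop, hget]
    rw [ih (fun j hj => h j (by simp [hj]))]

theorem ultimoA_snoc (num x : Int) (xs : List Int) :
    ultimo_indice num (xs ++ [x]) =
      if x = num then (xs.length : Int) else ultimo_indice num xs := by
  unfold ultimo_indice
  have hlen : ((xs ++ [x]).length : Int) - 1 = (xs.length : Int) := by
    simp
  rw [hlen]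
  rw [PySem.List.pyRange_neg_one_cons (by omega)]
  simp only [ultimoALoop]
  rw [PySem.List.pyGet?_append_length]
  by_cases hx : x = num
  · simp [hx]
  · have hne : (some x : Option Int) ≠ some num := by simp [hx]
    simp only [hne, hx, if_false]
    rw [ultimoALoop_append num x xs _ (by
      intro i hi
      rw [PySem.List.mem_pyRange_neg_one] at hi
      omega)]

-- B's fold over enumerate with start s, appended element.
theorem enumerate_append_singleton (xs : List Int) (x : Int) (s : Int) :
    PySem.List.enumerate (xs ++ [x]) s
      = PySem.List.enumerate xs s ++ [((s + xs.length : Int), x)] := by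
  induction xs generalizing s with
  | nil => simp [PySem.List.enumerate_cons, PySem.List.enumerate_nil]
  | cons y ys ih =>
    simp only [List.cons_append, PySem.List.enumerate_cons, ih]
    simp
    omega

theorem ultimoB_snoc (num x : Int) (xs : List Int) :
    ultimo_indice_alt num (xs ++ [x]) =
      if x = num then (xs.length : Int) else ultimo_indice_alt num xs := by
  unfold ultimo_indice_alt
  rw [enumerate_append_singleton xs x 0, List.foldl_append]
  simp

theorem ultimo_eq (num : Int) (lista : List Int) :
    ultimo_indice num lista = ultimo_indice_alt num lista := by
  induction lista using List.reverseRecOn with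
  | nil => rfl
  | append_singleton xs x ih =>
    rw [ultimoA_snoc, ultimoB_snoc, ih]

-- ===== VERDICT (by name: the statement is the Claim_ definition above) =====
theorem ultimo_indice_spec : Claim_equal_ultimo_indice := by
  intro num lista _
  exact ultimo_eq num lista
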